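-- pv_equiv track=rewrite | github.com/Denisijcu/nemesis_ai | src/network/protocol_analyzer.py | _identify_scan_type
-- ===== SOURCE A (Python) =====
-- from typing import Dict, List, Optional
--
-- def _identify_scan_type(flags_list: List[str]) -> str:
--     """Identifica el tipo de port scan"""
--
--     # SYN scan (stealth)
--     if all('S' in f and 'A' not in f for f in flags_list):
--         return "SYN_SCAN"
--
--     # Connect scan
--     if any('S' in f and 'A' in f for f in flags_list):
--         return "CONNECT_SCAN"
--
--     # FIN scan
--     if any('F' in f for f in flags_list):
--         return "FIN_SCAN"
--
--     # XMAS scan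
--     if any('FPU' in f for f in flags_list):
--         return "XMAS_SCAN"
--
--     # NULL scan
--     if any(f == '' for f in flags_list):
--         return "NULL_SCAN"
--
--     return "UNKNOWN_SCAN"
-- ===== SOURCE B (Python) =====
-- def _identify_scan_type(flags_list):
--     """Identifica el tipo de port scan"""
--     # one pass collecting all the evidence, then one ordered decision chain
--     all_syn_no_ack = True
--     any_syn_ack = False
--     any_fin = False
--     any_fpu = False
--     any_null = False
--     for f in flags_list:
--         all_syn_no_ack = all_syn_no_ack and ('S' in f and 'A' not in f)
--         any_syn_ack = any_syn_ack or ('S' in f and 'A' in f)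
--         any_fin = any_fin or ('F' in f)
--         any_fpu = any_fpu or ('FPU' in f)
--         any_null = any_null or (f == '')
--     if all_syn_no_ack:
--         return "SYN_SCAN"
--     if any_syn_ack:
--         return "CONNECT_SCAN"
--     if any_fin:
--         return "FIN_SCAN"
--     if any_fpu:
--         return "XMAS_SCAN"
--     if any_null:
--         return "NULL_SCAN"
--     return "UNKNOWN_SCAN"
-- ===== Notes on version B (the rewrite author's own statement) =====
-- stated objective: faster
-- what changed: Replaces A's five separate short-circuiting all()/any() passes over flags_list with one single pass maintaining five boolean accumulators, followed by the same ordered decision chain.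
import Mathlib
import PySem

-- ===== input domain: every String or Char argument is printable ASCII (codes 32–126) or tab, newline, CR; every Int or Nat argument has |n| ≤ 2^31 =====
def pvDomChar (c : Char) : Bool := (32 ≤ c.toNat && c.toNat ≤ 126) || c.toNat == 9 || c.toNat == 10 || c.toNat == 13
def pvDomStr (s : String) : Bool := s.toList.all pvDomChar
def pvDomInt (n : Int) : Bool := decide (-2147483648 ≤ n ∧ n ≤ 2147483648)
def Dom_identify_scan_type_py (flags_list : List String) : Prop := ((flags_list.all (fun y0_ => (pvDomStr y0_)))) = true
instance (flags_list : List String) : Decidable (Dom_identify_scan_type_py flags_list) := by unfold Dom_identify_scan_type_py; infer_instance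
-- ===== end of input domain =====

-- B replaces A's five separate all()/any() passes with one single pass over five boolean accumulators (alternative decomposition, same cost).

-- ===== PORT A =====
def identify_scan_type_py (flags_list : List String) : String :=
  if flags_list.all (fun f => PySem.Str.isIn "S" f && !PySem.Str.isIn "A" f) then "SYN_SCAN"
  else if flags_list.any (fun f => PySem.Str.isIn "S" f && PySem.Str.isIn "A" f) then "CONNECT_SCAN"
  else if flags_list.any (fun f => PySem.Str.isIn "F" f) then "FIN_SCAN"
  else if flags_list.any (fun f => PySem.Str.isIn "FPU" f) then "XMAS_SCAN"
  else if flags_list.any (fun f => f == "") then "NULL_SCAN"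
  else "UNKNOWN_SCAN"

-- ===== PORT B =====
-- one fold step updating the five accumulators (all_syn_no_ack, any_syn_ack, any_fin, any_fpu, any_null)
def scanStep (st : Bool × Bool × Bool × Bool × Bool) (f : String) : Bool × Bool × Bool × Bool × Bool :=
  (st.1 && (PySem.Str.isIn "S" f && !PySem.Str.isIn "A" f),
   st.2.1 || (PySem.Str.isIn "S" f && PySem.Str.isIn "A" f),
   st.2.2.1 || PySem.Str.isIn "F" f,
   st.2.2.2.1 || PySem.Str.isIn "FPU" f,
   st.2.2.2.2 || (f == ""))

def identify_scan_type_py_alt (flags_list : List String) : String :=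
  let st := flags_list.foldl scanStep (true, false, false, false, false)
  if st.1 then "SYN_SCAN"
  else if st.2.1 then "CONNECT_SCAN"
  else if st.2.2.1 then "FIN_SCAN"
  else if st.2.2.2.1 then "XMAS_SCAN"
  else if st.2.2.2.2 then "NULL_SCAN"
  else "UNKNOWN_SCAN"

-- ===== PRECONDITION & SPEC =====
def Spec_identify_scan_type_py (flags_list : List String) (out : String) : Prop := out = identify_scan_type_py_alt flags_list
instance (flags_list : List String) (out : String) : Decidable (Spec_identify_scan_type_py flags_list out) := by unfold Spec_identify_scan_type_py; infer_instance

-- ===== CLAIM (what is proved, stated in full; the proofs are below) =====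
def Claim_equal_identify_scan_type_py : Prop := ∀ (flags_list : List String), Dom_identify_scan_type_py flags_list → Spec_identify_scan_type_py flags_list (identify_scan_type_py flags_list)

-- ===== LEMMAS AND PROOFS =====
-- the single fold computes exactly the five all/any aggregates
theorem scanStep_foldl (l : List String) (a b c d e : Bool) :
    l.foldl scanStep (a, b, c, d, e) =
      (a && l.all (fun f => PySem.Str.isIn "S" f && !PySem.Str.isIn "A" f),
       b || l.any (fun f => PySem.Str.isIn "S" f && PySem.Str.isIn "A" f),
       c || l.any (fun f => PySem.Str.isIn "F" f),
       d || l.any (fun f => PySem.Str.isIn "FPU" f),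
       e || l.any (fun f => f == "")) := by
  induction l generalizing a b c d e with
  | nil => simp
  | cons x xs ih =>
      simp [scanStep, ih, Bool.and_assoc, Bool.or_assoc]

-- ===== VERDICT (by name: the statement is the Claim_ definition above) =====
theorem identify_scan_type_py_spec : Claim_equal_identify_scan_type_py := by
  intro flags_list _
  unfold Spec_identify_scan_type_py identify_scan_type_py identify_scan_type_py_alt
  rw [scanStep_foldl]
  simp
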